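-- pv_equiv track=rewrite | github.com/benreynwar/zamlet | test/main/python/fmvpu/control_structures.py | pack_bits_to_words
-- ===== SOURCE A (Python) =====
-- from typing import List, Tuple
--
-- def pack_bits_to_words(bits: List[bool], word_width: int = 32) -> List[int]:
--     """Pack a list of bits into words."""
--     words = []
--     for i in range(0, len(bits), word_width):
--         word = 0
--         for j in range(min(word_width, len(bits) - i)):
--             if bits[i + j]:
--                 word |= (1 << j)
--         words.append(word)
--     return words
-- ===== SOURCE B (Python) =====
-- from typing import List
--
-- def pack_bits_to_words(bits: List[bool], word_width: int = 32) -> List[int]: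
--     """Pack a list of bits into words (single flat pass with index arithmetic)."""
--     if word_width <= 0:
--         return []
--     num_words = (len(bits) + word_width - 1) // word_width
--     words = [0] * num_words
--     for index, bit in enumerate(bits):
--         if bit:
--             words[index // word_width] |= 1 << (index % word_width)
--     return words
-- ===== Notes on version B (the rewrite author's own statement) =====
-- stated objective: simpler
-- what changed: Replaces A's nested chunk-then-bit loops with one flat pass over enumerate(bits) that scatters each set bit into a preallocated [0]*num_words array via index//word_width and index%word_width.
import Mathlib
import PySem

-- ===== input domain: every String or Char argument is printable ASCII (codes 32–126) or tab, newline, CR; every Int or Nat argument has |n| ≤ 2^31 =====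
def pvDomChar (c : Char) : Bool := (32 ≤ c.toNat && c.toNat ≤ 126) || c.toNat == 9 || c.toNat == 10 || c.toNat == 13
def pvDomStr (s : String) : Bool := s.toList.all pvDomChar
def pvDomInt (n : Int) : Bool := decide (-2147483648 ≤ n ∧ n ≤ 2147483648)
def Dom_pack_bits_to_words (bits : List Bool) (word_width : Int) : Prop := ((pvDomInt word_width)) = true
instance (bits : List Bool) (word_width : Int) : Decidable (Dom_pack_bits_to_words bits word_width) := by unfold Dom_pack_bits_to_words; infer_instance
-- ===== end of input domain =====

-- B packs the bits in ONE flat pass over enumerate(bits), scattering each set bit into a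
-- preallocated zero array by index arithmetic, instead of A's nested chunk-then-bit loops.

-- ===== PORT A =====
-- bits[i + j] is always in range when the inner loop body runs, so pyGetD's default is never
-- used; 1 << j with j ≥ 0 from range() is 1 <<< j.toNat.
def pack_bits_to_words (bits : List Bool) (word_width : Int) : List Int :=
  (PySem.List.pyRange 0 (bits.length : Int) word_width).foldl
    (fun words i =>
      let word : Int :=
        (PySem.List.pyRange 0 (min word_width ((bits.length : Int) - i)) 1).foldl
          (fun word j =>
            if PySem.List.pyGetD bits (i + j) false then PySem.Int.bor word ((1 : Int) <<< j.toNat) else word) 0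
      words ++ [word])
    []

-- ===== PORT B =====
-- index // word_width is nonnegative (index ≥ 0, word_width > 0 here), so .toNat is exact;
-- words[index // word_width] is always in range, so getD/set are exact for Python's |=.
def pack_bits_to_words_alt (bits : List Bool) (word_width : Int) : List Int :=
  if word_width ≤ 0 then []
  else
    let num_words : Int := PySem.Int.floordiv ((bits.length : Int) + word_width - 1) word_width
    (PySem.List.enumerate bits).foldl
      (fun words p =>
        if p.2 then
          let w : Nat := (PySem.Int.floordiv p.1 word_width).toNat
          words.set w (PySem.Int.bor (words.getD w 0) ((1 : Int) <<< (PySem.Int.mod p.1 word_width).toNat))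
        else words)
      (List.replicate num_words.toNat 0)

-- ===== PRECONDITION & SPEC =====
-- Pre_ excludes exactly word_width = 0, where A raises ValueError (range() step must not be zero).
def Pre_pack_bits_to_words (bits : List Bool) (word_width : Int) : Prop := word_width ≠ 0
instance (bits : List Bool) (word_width : Int) : Decidable (Pre_pack_bits_to_words bits word_width) := by unfold Pre_pack_bits_to_words; infer_instance
def pvWitness_pack_bits_to_words : List Bool × Int := ([true, false, true, true, false], 2)

def Spec_pack_bits_to_words (bits : List Bool) (word_width : Int) (out : List Int) : Prop := out = pack_bits_to_words_alt bits word_width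
instance (bits : List Bool) (word_width : Int) (out : List Int) : Decidable (Spec_pack_bits_to_words bits word_width out) := by unfold Spec_pack_bits_to_words; infer_instance

-- ===== CLAIM (what is proved, stated in full; the proofs are below) =====
def Claim_equal_pack_bits_to_words : Prop := ∀ (bits : List Bool) (word_width : Int), Dom_pack_bits_to_words bits word_width → Pre_pack_bits_to_words bits word_width → Spec_pack_bits_to_words bits word_width (pack_bits_to_words bits word_width)
-- ===== LEMMAS AND PROOFS =====

-- Reference: pack a chunk (fold, bit position s for the head), and pack chunk-by-chunk with
-- width w+1 (the +1 encoding makes termination structural).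
def pvWordF : List Bool → Nat → Int → Int
  | [], _, v => v
  | b :: t, s, v => pvWordF t (s + 1) (if b then PySem.Int.bor v ((1 : Int) <<< s) else v)

def pvPackRef (w : Nat) : List Bool → List Int
  | [] => []
  | b :: t => pvWordF ((b :: t).take (w + 1)) 0 0 :: pvPackRef w ((b :: t).drop (w + 1))
  termination_by l => l.length
  decreasing_by simp [List.length_drop]

-- B's loop body and A's inner loop, named for the proofs.
def pvUpd (ww : Int) (words : List Int) (p : Int × Bool) : List Int :=
  if p.2 then
    let w : Nat := (PySem.Int.floordiv p.1 ww).toNat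
    words.set w (PySem.Int.bor (words.getD w 0) ((1 : Int) <<< (PySem.Int.mod p.1 ww).toNat))
  else words

def pvInner (bits : List Bool) (ww i : Int) : Int :=
  (PySem.List.pyRange 0 (min ww ((bits.length : Int) - i)) 1).foldl
    (fun word j =>
      if PySem.List.pyGetD bits (i + j) false then PySem.Int.bor word ((1 : Int) <<< j.toNat) else word) 0

theorem pvA_map (bits : List Bool) (ww : Int) :
    pack_bits_to_words bits ww
      = (PySem.List.pyRange 0 (bits.length : Int) ww).map (pvInner bits ww) := by
  unfold pack_bits_to_words
  simpa using PySem.List.foldl_append_singleton_eq_map (pvInner bits ww)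
    (PySem.List.pyRange 0 (bits.length : Int) ww) []

theorem pvCount (w : Nat) (n : Int) (hn : 0 < n) :
    PySem.List.pyRange 0 n ((w : Int) + 1)
      = (List.range (((n - 1) / ((w : Int) + 1)).toNat + 1)).map (fun k : Nat => ((w : Int) + 1) * (k : Int)) := by
  have hw : (0 : Int) < (w : Int) + 1 := by omega
  rw [PySem.List.pyRange_of_pos 0 n hw]
  have h1 : n - 0 + ((w : Int) + 1) - 1 = (n - 1) + 1 * ((w : Int) + 1) := by ring
  have h2 : ((n - 1) + 1 * ((w : Int) + 1)) / ((w : Int) + 1) = (n - 1) / ((w : Int) + 1) + 1 :=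
    Int.add_mul_ediv_right _ _ (by omega)
  have h3 : 0 ≤ (n - 1) / ((w : Int) + 1) := Int.ediv_nonneg (by omega) (by omega)
  rw [if_pos hn, h1, h2]
  have h4 : ((n - 1) / ((w : Int) + 1) + 1).toNat = ((n - 1) / ((w : Int) + 1)).toNat + 1 := by
    omega
  rw [h4]
  simp only [zero_add]

theorem pvRangeWord (c : List Bool) : ∀ (s : Nat) (v : Int),
    (List.range c.length).foldl
      (fun word k => if c.getD k false then PySem.Int.bor word ((1 : Int) <<< (s + k)) else word) v
      = pvWordF c s v := by
  induction c with
  | nil => intro s v; simp [pvWordF]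
  | cons b t ih =>
    intro s v
    rw [List.length_cons, List.range_succ_eq_map]
    simp only [List.foldl_cons, List.foldl_map, List.getD_cons_zero, List.getD_cons_succ,
      Nat.succ_eq_add_one]
    rw [pvWordF]
    rw [show (fun (word : Int) (k : Nat) => if t.getD k false
          then PySem.Int.bor word ((1 : Int) <<< (s + (k + 1))) else word)
        = (fun (word : Int) (k : Nat) => if t.getD k false
          then PySem.Int.bor word ((1 : Int) <<< ((s + 1) + k)) else word) by
      funext word k; rw [show s + (k + 1) = (s + 1) + k by omega]]
    rw [show s + 0 = s by omega]
    exact ih (s + 1) _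

theorem pvGetD_drop {α : Type} (l : List α) (d : Nat) (m : Int) (hm : 0 ≤ m) (x : α) :
    PySem.List.pyGetD (l.drop d) m x = PySem.List.pyGetD l ((d : Int) + m) x := by
  have h1 : (0 : Int) ≤ (d : Int) + m := by omega
  simp only [PySem.List.pyGetD, PySem.List.pyGet?, PySem.List.pyIdx?, if_pos hm, if_pos h1,
    List.length_drop]
  by_cases h2 : m < ((l.length - d : Nat) : Int)
  · have h3 : (d : Int) + m < (l.length : Int) := by omega
    rw [if_pos h2, if_pos h3]
    simp only [Option.bind_some, List.getElem?_drop]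
    congr 2
    omega
  · have h3 : ¬ ((d : Int) + m < (l.length : Int)) := by omega
    rw [if_neg h2, if_neg h3]
    rfl

theorem pvInner_zero (w : Nat) (bits : List Bool) :
    pvInner bits ((w : Int) + 1) 0 = pvWordF (bits.take (w + 1)) 0 0 := by
  unfold pvInner
  have hm : min ((w : Int) + 1) ((bits.length : Int) - 0) = ((bits.take (w + 1)).length : Int) := by
    push_cast [List.length_take]
    omega
  rw [hm, PySem.List.pyRange_one, List.foldl_map]
  have hlen : (((bits.take (w + 1)).length : Int) - 0).toNat = (bits.take (w + 1)).length := by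
    omega
  rw [hlen]
  have hcongr : ∀ (acc : Int), ∀ k ∈ List.range (bits.take (w + 1)).length,
      (fun word j => if PySem.List.pyGetD bits (0 + j) false
          then PySem.Int.bor word ((1 : Int) <<< j.toNat) else word) acc ((0 : Int) + (k : Int))
        = (fun word k => if (bits.take (w + 1)).getD k false
          then PySem.Int.bor word ((1 : Int) <<< ((0 : Nat) + k)) else word) acc k := by
    intro acc k hk
    rw [List.mem_range] at hk
    have hk' : k < bits.length := by
      have := List.length_take_le (w + 1) bits
      omega
    simp only [zero_add, PySem.List.pyGetD_natCast, Int.toNat_natCast]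
    have : (bits.take (w + 1)).getD k false = bits.getD k false := by
      simp only [List.getD_eq_getElem?_getD]
      rw [List.getElem?_take_of_lt (by omega)]
    rw [this]
  rw [PySem.List.foldl_congr_mem _ _ _ _ hcongr]
  exact pvRangeWord (bits.take (w + 1)) 0 0

theorem pvInner_shift (w : Nat) (bits : List Bool) (i : Int) (hi : 0 ≤ i)
    (hww : w + 1 ≤ bits.length) :
    pvInner bits ((w : Int) + 1) (((w : Int) + 1) + i)
      = pvInner (bits.drop (w + 1)) ((w : Int) + 1) i := by
  unfold pvInner
  have hlen : (((bits.drop (w + 1)).length : Int)) = (bits.length : Int) - ((w : Int) + 1) := by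
    simp [List.length_drop]
    omega
  have hm : min ((w : Int) + 1) ((bits.length : Int) - (((w : Int) + 1) + i))
      = min ((w : Int) + 1) (((bits.drop (w + 1)).length : Int) - i) := by
    rw [hlen]; ring_nf
  rw [hm]
  apply PySem.List.foldl_congr_mem
  intro acc j hj
  have hj0 : 0 ≤ j := by
    rcases (PySem.List.mem_pyRange_one.mp hj) with ⟨h1, _⟩
    exact h1
  have : ((w : Int) + 1) + i + j = ((w + 1 : Nat) : Int) + (i + j) := by push_cast; ring
  rw [this, ← pvGetD_drop bits (w + 1) (i + j) (by omega)]

theorem pvRangeNil (s : Int) : PySem.List.pyRange 0 0 s = [] := by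
  unfold PySem.List.pyRange
  split_ifs <;> simp_all

theorem pvA_ref (w : Nat) (bits : List Bool) :
    pack_bits_to_words bits ((w : Int) + 1) = pvPackRef w bits := by
  induction bits using pvPackRef.induct w with
  | case1 =>
    rw [pvA_map]
    simp [List.length_nil, pvRangeNil, pvPackRef]
  | case2 b t ih =>
    have hn : (0 : Int) < (((b :: t).length : Int)) := by push_cast [List.length_cons]; omega
    rw [pvA_map, pvCount w _ hn, List.map_map, List.range_succ_eq_map, List.map_cons,
      List.map_map, pvPackRef]
    congr 1
    · simp only [Function.comp]
      rw [show ((w : Int) + 1) * (((0 : Nat)) : Int) = 0 by simp]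
      exact pvInner_zero w (b :: t)
    · by_cases hle : (b :: t).length ≤ w + 1
      · have hdrop : (b :: t).drop (w + 1) = [] := List.drop_eq_nil_of_le hle
        have hM0 : ((((b :: t).length : Int)) - 1) / ((w : Int) + 1) = 0 :=
          Int.ediv_eq_zero_of_lt (by omega) (by push_cast [List.length_cons] at hle ⊢; omega)
        rw [hM0, hdrop]
        simp [pvPackRef]
      · have hlen : w + 1 < (b :: t).length := by omega
        have hn' : (0 : Int) < ((((b :: t).drop (w + 1)).length : Int)) := by
          rw [List.length_drop]; omega
        rw [← ih, pvA_map, pvCount w _ hn', List.map_map]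
        have hM : (((((b :: t).length : Int)) - 1) / ((w : Int) + 1)).toNat
            = ((((((b :: t).drop (w + 1)).length : Int)) - 1) / ((w : Int) + 1)).toNat + 1 := by
          have e1 : (((b :: t).length : Int)) - 1
              = (((((b :: t).drop (w + 1)).length : Int)) - 1) + 1 * ((w : Int) + 1) := by
            rw [List.length_drop]; push_cast [Nat.cast_sub (le_of_lt hlen)]; ring
          have h3 : 0 ≤ ((((((b :: t).drop (w + 1)).length : Int)) - 1) / ((w : Int) + 1)) :=
            Int.ediv_nonneg (by omega) (by omega)
          rw [e1, Int.add_mul_ediv_right _ _ (by omega : ((w : Int) + 1) ≠ 0)]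
          omega
        rw [hM]
        apply List.map_congr_left
        intro k hk
        simp only [Function.comp]
        rw [show ((w : Int) + 1) * (((k + 1 : Nat)) : Int)
            = ((w : Int) + 1) + ((w : Int) + 1) * (k : Int) by push_cast; ring]
        exact pvInner_shift w (b :: t) (((w : Int) + 1) * (k : Int)) (by positivity)
          (le_of_lt hlen)

theorem pvB_unfold (bits : List Bool) (ww : Int) (h : ¬ ww ≤ 0) :
    pack_bits_to_words_alt bits ww
      = (PySem.List.enumerate bits).foldl (pvUpd ww)
          (List.replicate (PySem.Int.floordiv ((bits.length : Int) + ww - 1) ww).toNat 0) := by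
  unfold pack_bits_to_words_alt
  rw [if_neg h]
  rfl

theorem pvFirst (w : Nat) (c : List Bool) : ∀ (s : Nat) (x : Int) (ws : List Int),
    s + c.length ≤ w + 1 →
    (PySem.List.enumerate c (s : Int)).foldl (pvUpd ((w : Int) + 1)) (x :: ws)
      = pvWordF c s x :: ws := by
  induction c with
  | nil => intro s x ws _; simp [PySem.List.enumerate, pvWordF]
  | cons b t ih =>
    intro s x ws h
    rw [PySem.List.enumerate_cons, List.foldl_cons]
    have hupd : pvUpd ((w : Int) + 1) (x :: ws) ((s : Int), b)
        = (if b then PySem.Int.bor x ((1 : Int) <<< s) else x) :: ws := by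
      unfold pvUpd
      cases b with
      | false => simp
      | true =>
        have hs : s < w + 1 := by simp [List.length_cons] at h; omega
        have d0 : ((s : Int)) / ((w : Int) + 1) = 0 :=
          Int.ediv_eq_zero_of_lt (by omega) (by omega)
        have m0 : ((s : Int)) % ((w : Int) + 1) = (s : Int) :=
          Int.emod_eq_of_lt (by omega) (by omega)
        simp [d0, m0]
    rw [hupd, pvWordF, show (s : Int) + 1 = (((s + 1) : Nat) : Int) by push_cast; ring]
    exact ih (s + 1) _ ws (by simp at h ⊢; omega)

theorem pvShift (w : Nat) (r : List Bool) : ∀ (s : Nat) (x : Int) (ws : List Int),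
    (PySem.List.enumerate r (((w : Int) + 1) + (s : Int))).foldl (pvUpd ((w : Int) + 1)) (x :: ws)
      = x :: (PySem.List.enumerate r (s : Int)).foldl (pvUpd ((w : Int) + 1)) ws := by
  induction r with
  | nil => intro s x ws; simp [PySem.List.enumerate]
  | cons b t ih =>
    intro s x ws
    rw [PySem.List.enumerate_cons, PySem.List.enumerate_cons, List.foldl_cons, List.foldl_cons]
    have hw : (0 : Int) < (w : Int) + 1 := by omega
    have hupd : pvUpd ((w : Int) + 1) (x :: ws) ((((w : Int) + 1) + (s : Int)), b)
        = x :: pvUpd ((w : Int) + 1) ws ((s : Int), b) := by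
      unfold pvUpd
      cases b with
      | false => simp
      | true =>
        have hfd : PySem.Int.floordiv (((w : Int) + 1) + (s : Int)) ((w : Int) + 1)
            = (s : Int) / ((w : Int) + 1) + 1 := by
          rw [PySem.Int.floordiv_eq_ediv_of_pos hw,
            show ((w : Int) + 1) + (s : Int) = (s : Int) + 1 * ((w : Int) + 1) by ring,
            Int.add_mul_ediv_right _ _ (ne_of_gt hw)]
        have hfd2 : PySem.Int.floordiv (s : Int) ((w : Int) + 1) = (s : Int) / ((w : Int) + 1) :=
          PySem.Int.floordiv_eq_ediv_of_pos hw
        have hnn : 0 ≤ (s : Int) / ((w : Int) + 1) := Int.ediv_nonneg (by omega) (by omega)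
        have htn : (((s : Int) / ((w : Int) + 1) + 1)).toNat
            = ((s : Int) / ((w : Int) + 1)).toNat + 1 := by omega
        have hmd : PySem.Int.mod (((w : Int) + 1) + (s : Int)) ((w : Int) + 1)
            = PySem.Int.mod (s : Int) ((w : Int) + 1) := by
          rw [PySem.Int.mod_eq_emod_of_pos hw, PySem.Int.mod_eq_emod_of_pos hw,
            show ((w : Int) + 1) + (s : Int) = (s : Int) + ((w : Int) + 1) * 1 by ring,
            Int.add_mul_emod_self_left]
        simp only [hfd, hfd2, htn, hmd, List.set_cons_succ, List.getD_cons_succ]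
        simp
    rw [hupd,
      show ((w : Int) + 1) + (s : Int) + 1 = ((w : Int) + 1) + (((s + 1) : Nat) : Int) by
        push_cast; ring,
      show (s : Int) + 1 = (((s + 1) : Nat) : Int) by push_cast; ring]
    exact ih (s + 1) x _

theorem pvB_ref (w : Nat) (bits : List Bool) :
    pack_bits_to_words_alt bits ((w : Int) + 1) = pvPackRef w bits := by
  have hw : (0 : Int) < (w : Int) + 1 := by omega
  induction bits using pvPackRef.induct w with
  | case1 =>
    rw [pvB_unfold _ _ (by omega)]
    have h0 : PySem.Int.floordiv (((List.length ([] : List Bool)) : Int) + ((w : Int) + 1) - 1)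
        ((w : Int) + 1) = 0 := by
      simp only [List.length_nil, Nat.cast_zero, zero_add]
      rw [PySem.Int.floordiv_eq_ediv_of_pos hw]
      exact Int.ediv_eq_zero_of_lt (by omega) (by omega)
    rw [h0]
    simp [PySem.List.enumerate, pvPackRef]
  | case2 b t ih =>
    have hn : (0 : Int) < (((b :: t).length : Int)) := by push_cast [List.length_cons]; omega
    rw [pvB_unfold _ _ (by omega)]
    have hN : (PySem.Int.floordiv ((((b :: t).length : Int)) + ((w : Int) + 1) - 1)
        ((w : Int) + 1)).toNat = ((((b :: t).length : Int) - 1) / ((w : Int) + 1)).toNat + 1 := by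
      rw [PySem.Int.floordiv_eq_ediv_of_pos hw,
        show (((b :: t).length : Int)) + ((w : Int) + 1) - 1
          = ((((b :: t).length : Int)) - 1) + 1 * ((w : Int) + 1) by ring,
        Int.add_mul_ediv_right _ _ (ne_of_gt hw)]
      have h3 : 0 ≤ ((((b :: t).length : Int)) - 1) / ((w : Int) + 1) :=
        Int.ediv_nonneg (by omega) (by omega)
      omega
    rw [hN, List.replicate_succ]
    have hsplit : PySem.List.enumerate (b :: t) (0 : Int)
        = PySem.List.enumerate ((b :: t).take (w + 1)) (0 : Int)
          ++ PySem.List.enumerate ((b :: t).drop (w + 1))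
              ((0 : Int) + (((b :: t).take (w + 1)).length : Int)) := by
      conv_lhs => rw [← List.take_append_drop (w + 1) (b :: t)]
      rw [PySem.List.enumerate_append]
    rw [hsplit, List.foldl_append]
    have hfirst := pvFirst w ((b :: t).take (w + 1)) 0 0
      (List.replicate ((((b :: t).length : Int) - 1) / ((w : Int) + 1)).toNat 0)
      (by rw [List.length_take]; omega)
    rw [Nat.cast_zero] at hfirst
    rw [hfirst]
    by_cases hle : (b :: t).length ≤ w + 1
    · have hdrop : (b :: t).drop (w + 1) = [] := List.drop_eq_nil_of_le hle
      have hM0 : ((((b :: t).length : Int)) - 1) / ((w : Int) + 1) = 0 :=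
        Int.ediv_eq_zero_of_lt (by omega) (by push_cast [List.length_cons] at hle ⊢; omega)
      have hdrop' : List.drop w t = [] := by simpa using hdrop
      rw [hdrop, hM0]
      simp [PySem.List.enumerate, pvPackRef, hdrop']
    · have hlen : w + 1 < (b :: t).length := by omega
      have hcl : ((b :: t).take (w + 1)).length = w + 1 := by
        rw [List.length_take]; omega
      have hshift := pvShift w ((b :: t).drop (w + 1)) 0 (pvWordF ((b :: t).take (w + 1)) 0 0)
        (List.replicate ((((b :: t).length : Int) - 1) / ((w : Int) + 1)).toNat 0)
      rw [Nat.cast_zero, add_zero] at hshift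
      rw [hcl, show (0 : Int) + ((w + 1 : Nat) : Int) = ((w : Int) + 1) by push_cast; ring,
        hshift, pvPackRef]
      congr 1
      rw [← ih, pvB_unfold _ _ (by omega)]
      have hn' : (0 : Int) < ((((b :: t).drop (w + 1)).length : Int)) := by
        rw [List.length_drop]; omega
      have hM : ((((b :: t).length : Int) - 1) / ((w : Int) + 1)).toNat
          = (PySem.Int.floordiv (((((b :: t).drop (w + 1)).length : Int)) + ((w : Int) + 1) - 1)
              ((w : Int) + 1)).toNat := by
        rw [PySem.Int.floordiv_eq_ediv_of_pos hw]
        have e1 : ((((b :: t).drop (w + 1)).length : Int)) + ((w : Int) + 1) - 1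
            = ((((b :: t).length : Int)) - 1 - 1 * ((w : Int) + 1)) + 1 * ((w : Int) + 1) := by
          rw [List.length_drop]; push_cast [Nat.cast_sub (le_of_lt hlen)]; ring
        have e2 : (((b :: t).length : Int)) - 1
            = ((((b :: t).length : Int)) - 1 - 1 * ((w : Int) + 1)) + 1 * ((w : Int) + 1) := by
          ring
        rw [e1, ← e2]
      rw [hM]

theorem pvA_neg (bits : List Bool) (ww : Int) (h : ww < 0) :
    pack_bits_to_words bits ww = [] := by
  have : PySem.List.pyRange 0 (bits.length : Int) ww = [] := by
    unfold PySem.List.pyRange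
    have h0 : ¬ (ww = 0) := by omega
    have h1 : ¬ (0 < ww) := by omega
    have h2 : ¬ ((bits.length : Int) < 0) := by omega
    simp [h0, h1, h2]
  simp [pack_bits_to_words, this]

theorem pack_bits_to_words_spec : Claim_equal_pack_bits_to_words := by
  intro bits ww _ hpre
  unfold Spec_pack_bits_to_words
  rcases lt_or_gt_of_ne hpre with hneg | hpos
  · rw [pvA_neg bits ww hneg]
    simp [pack_bits_to_words_alt, le_of_lt hneg]
  · obtain ⟨w, rfl⟩ : ∃ w : Nat, ww = (w : Int) + 1 :=
      ⟨(ww - 1).toNat, by omega⟩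
    rw [pvA_ref, pvB_ref]
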